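-- pv_equiv track=rewrite | github.com/dstiefe/medsyncai_agentic_backend | app/agents/clinical/ais_clinical_engine/agents/qa/section_router.py | _prefer_specific
-- ===== SOURCE A (Python) =====
-- from typing import Any, Dict, List, Optional, Tuple
--
-- def _prefer_specific(sections: List[str]) -> List[str]:
--     """
--     When both parent and child sections match (e.g., 4.7 and 4.7.3),
--     prefer the more specific child.
--     """
--     if len(sections) <= 1:
--         return sections
--
--     # Remove parents when their children are also present
--     to_remove = set()
--     for s1 in sections:
--         for s2 in sections:
--             if s1 != s2 and s2.startswith(s1 + "."):
--                 to_remove.add(s1)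
--
--     filtered = [s for s in sections if s not in to_remove]
--     return filtered if filtered else sections
-- ===== SOURCE B (Python) =====
-- def _prefer_specific(sections):
--     """Keep only the most specific sections: one pass collects every
--     dot-delimited proper prefix occurring in any section, then a single
--     filter drops sections that are such a prefix (i.e. parents)."""
--     prefixes = set()
--     for t in sections:
--         for i, ch in enumerate(t):
--             if ch == ".":
--                 prefixes.add(t[:i])
--     return [s for s in sections if s not in prefixes]
-- ===== Notes on version B (the rewrite author's own statement) =====
-- stated objective: faster
-- what changed: Replaces the all-pairs startswith scan with a single pass that collects every dot-delimited proper prefix into a set, then one filter by set membership; the dead 'filtered or sections' fallback and the len<=1 guard disappear.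
import Mathlib
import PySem

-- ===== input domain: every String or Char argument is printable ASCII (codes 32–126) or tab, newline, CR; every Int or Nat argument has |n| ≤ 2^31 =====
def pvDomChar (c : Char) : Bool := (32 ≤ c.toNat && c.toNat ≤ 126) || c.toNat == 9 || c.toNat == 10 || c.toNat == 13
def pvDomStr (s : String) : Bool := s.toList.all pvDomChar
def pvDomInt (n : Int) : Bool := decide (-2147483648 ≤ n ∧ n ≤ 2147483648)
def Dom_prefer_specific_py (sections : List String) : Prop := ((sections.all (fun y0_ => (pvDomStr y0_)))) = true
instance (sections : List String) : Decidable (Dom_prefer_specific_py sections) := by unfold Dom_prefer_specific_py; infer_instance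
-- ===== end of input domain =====

-- B replaces A's all-pairs startswith scan by one pass collecting every dot-delimited
-- proper prefix into a set plus one membership filter (objective: faster).

-- ===== PORT A =====
-- literal port of A: pairwise nested loops filling to_remove, then filter, with the
-- len<=1 early return and the 'filtered if filtered else sections' fallback.
-- (s1 + "." / startswith ported on .toList via PySem.Chars — exact on code points)
def prefer_specific_py (sections : List String) : List String :=
  if sections.length ≤ 1 then sections
  else
    let to_remove : PySem.Set String :=
      sections.foldl (fun acc s1 =>
        sections.foldl (fun acc2 s2 =>
          if s1 ≠ s2 ∧ PySem.Chars.startswith s2.toList (s1.toList ++ ['.']) = true then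
            PySem.Set.add acc2 s1
          else acc2) acc)
        PySem.Set.empty
    let filtered := sections.filter (fun s => !(PySem.Set.contains to_remove s))
    if filtered ≠ [] then filtered else sections

-- ===== PORT B =====
-- literal port of Source B: one pass over sections, inner enumerate over the characters,
-- t[:i] = PySem.List.slice; then one filter by set membership.
def prefer_specific_py_alt (sections : List String) : List String :=
  let prefixes : PySem.Set (List Char) :=
    sections.foldl (fun acc t =>
      (PySem.List.enumerate t.toList).foldl (fun acc2 p =>
        if p.2 = '.' then PySem.Set.add acc2 (PySem.List.slice t.toList none (some p.1))
        else acc2) acc)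
      PySem.Set.empty
  sections.filter (fun s => !(PySem.Set.contains prefixes s.toList))

-- ===== PRECONDITION & SPEC =====
def Spec_prefer_specific_py (sections : List String) (out : List String) : Prop := out = prefer_specific_py_alt sections
instance (sections : List String) (out : List String) : Decidable (Spec_prefer_specific_py sections out) := by unfold Spec_prefer_specific_py; infer_instance

-- ===== CLAIM (what is proved, stated in full; the proofs are below) =====
def Claim_equal_prefer_specific_py : Prop := ∀ (sections : List String), Dom_prefer_specific_py sections → Spec_prefer_specific_py sections (prefer_specific_py sections)

-- ===== LEMMAS AND PROOFS =====

-- canonical "s is a dot-parent of some member of l"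
def IsParent (l : List String) (s : List Char) : Prop :=
  ∃ t ∈ l, ∃ j : Nat, j < t.toList.length ∧ t.toList[j]? = some '.' ∧ s = t.toList.take j

-- membership in A's inner loop
theorem memA_inner (l : List String) (s1 x : String) (acc : PySem.Set String) :
    x ∈ l.foldl (fun acc2 s2 =>
      if s1 ≠ s2 ∧ PySem.Chars.startswith s2.toList (s1.toList ++ ['.']) = true then
        PySem.Set.add acc2 s1 else acc2) acc
    ↔ x ∈ acc ∨ (x = s1 ∧ ∃ s2 ∈ l, s1 ≠ s2 ∧
        PySem.Chars.startswith s2.toList (s1.toList ++ ['.']) = true) := by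
  induction l generalizing acc with
  | nil => simp
  | cons h tl ih =>
    simp only [List.foldl_cons, ih]
    split_ifs with hc
    · simp only [PySem.Set.mem_add]
      constructor
      · rintro (⟨hx | rfl⟩ | ⟨rfl, s2, hs2, hcond⟩)
        · exact Or.inl hx
        · exact Or.inr ⟨rfl, h, by simp, hc⟩
        · exact Or.inr ⟨rfl, s2, by simp [hs2], hcond⟩
      · rintro (hx | ⟨rfl, s2, hs2, hcond⟩)
        · exact Or.inl (Or.inl hx)
        · rcases List.mem_cons.mp hs2 with rfl | hs2
          · exact Or.inl (Or.inr rfl)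
          · exact Or.inr ⟨rfl, s2, hs2, hcond⟩
    · constructor
      · rintro (hx | ⟨rfl, s2, hs2, hcond⟩)
        · exact Or.inl hx
        · exact Or.inr ⟨rfl, s2, by simp [hs2], hcond⟩
      · rintro (hx | ⟨rfl, s2, hs2, hcond⟩)
        · exact Or.inl hx
        · rcases List.mem_cons.mp hs2 with rfl | hs2
          · exact absurd hcond (by tauto)
          · exact Or.inr ⟨rfl, s2, hs2, hcond⟩

-- membership in A's to_remove set
theorem memA (sections l : List String) (x : String) (acc : PySem.Set String) :
    x ∈ l.foldl (fun acc s1 =>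
      sections.foldl (fun acc2 s2 =>
        if s1 ≠ s2 ∧ PySem.Chars.startswith s2.toList (s1.toList ++ ['.']) = true then
          PySem.Set.add acc2 s1 else acc2) acc) acc
    ↔ x ∈ acc ∨ (x ∈ l ∧ ∃ s2 ∈ sections, x ≠ s2 ∧
        PySem.Chars.startswith s2.toList (x.toList ++ ['.']) = true) := by
  induction l generalizing acc with
  | nil => simp
  | cons h tl ih =>
    simp only [List.foldl_cons, ih, memA_inner]
    constructor
    · rintro (⟨hx | ⟨rfl, hex⟩⟩ | ⟨hx, hex⟩)
      · exact Or.inl hx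
      · exact Or.inr ⟨by simp, hex⟩
      · exact Or.inr ⟨by simp [hx], hex⟩
    · rintro (hx | ⟨hx, hex⟩)
      · exact Or.inl (Or.inl hx)
      · rcases List.mem_cons.mp hx with rfl | hx
        · exact Or.inl (Or.inr ⟨rfl, hex⟩)
        · exact Or.inr ⟨hx, hex⟩

-- membership in enumerate
theorem mem_enumerate (cs : List Char) (s : Int) (p : Int × Char) :
    p ∈ PySem.List.enumerate cs s ↔ ∃ j : Nat, j < cs.length ∧ p = (s + j, cs[j]!) := by
  induction cs generalizing s with
  | nil => simp [PySem.List.enumerate]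
  | cons c tl ih =>
    rw [PySem.List.enumerate_cons]
    simp only [List.mem_cons, ih]
    constructor
    · rintro (rfl | ⟨j, hj, rfl⟩)
      · exact ⟨0, by simp⟩
      · refine ⟨j + 1, by simpa using hj, ?_⟩
        have h1 : (c :: tl)[j + 1]! = tl[j]! := by
          rw [getElem!_pos (c :: tl) (j + 1) (by simpa using Nat.succ_lt_succ hj),
            getElem!_pos tl j hj]
          simp
        rw [h1]
        congr 1
        push_cast
        ring
    · rintro ⟨j, hj, hp⟩
      cases j with
      | zero => exact Or.inl (by simpa using hp)
      | succ j =>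
        refine Or.inr ⟨j, by simpa using hj, ?_⟩
        have hj' : j < tl.length := by simpa using hj
        have h1 : (c :: tl)[j + 1]! = tl[j]! := by
          rw [getElem!_pos (c :: tl) (j + 1) (by simpa using hj), getElem!_pos tl j hj']
          simp
        rw [hp, h1]
        congr 1
        push_cast
        ring

-- membership in B's inner loop
theorem memB_inner (es : List (Int × Char)) (T : List Char) (x : List Char)
    (acc : PySem.Set (List Char)) :
    x ∈ es.foldl (fun acc2 p =>
      if p.2 = '.' then PySem.Set.add acc2 (PySem.List.slice T none (some p.1)) else acc2) acc
    ↔ x ∈ acc ∨ ∃ p ∈ es, p.2 = '.' ∧ x = PySem.List.slice T none (some p.1) := by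
  induction es generalizing acc with
  | nil => simp
  | cons h tl ih =>
    simp only [List.foldl_cons, ih]
    split_ifs with hc
    · simp only [PySem.Set.mem_add]
      constructor
      · rintro (⟨hx | rfl⟩ | ⟨p, hp, h2, rfl⟩)
        · exact Or.inl hx
        · exact Or.inr ⟨h, by simp, hc, rfl⟩
        · exact Or.inr ⟨p, by simp [hp], h2, rfl⟩
      · rintro (hx | ⟨p, hp, h2, rfl⟩)
        · exact Or.inl (Or.inl hx)
        · rcases List.mem_cons.mp hp with rfl | hp
          · exact Or.inl (Or.inr rfl)
          · exact Or.inr ⟨p, hp, h2, rfl⟩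
    · constructor
      · rintro (hx | ⟨p, hp, h2, rfl⟩)
        · exact Or.inl hx
        · exact Or.inr ⟨p, by simp [hp], h2, rfl⟩
      · rintro (hx | ⟨p, hp, h2, rfl⟩)
        · exact Or.inl hx
        · rcases List.mem_cons.mp hp with rfl | hp
          · exact absurd h2 hc
          · exact Or.inr ⟨p, hp, h2, rfl⟩

-- membership in B's prefixes set, in canonical form
theorem memB (l : List String) (x : List Char) (acc : PySem.Set (List Char)) :
    x ∈ l.foldl (fun acc t =>
      (PySem.List.enumerate t.toList).foldl (fun acc2 p =>
        if p.2 = '.' then PySem.Set.add acc2 (PySem.List.slice t.toList none (some p.1))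
        else acc2) acc) acc
    ↔ x ∈ acc ∨ IsParent l x := by
  induction l generalizing acc with
  | nil => simp [IsParent]
  | cons h tl ih =>
    simp only [List.foldl_cons, ih, memB_inner]
    constructor
    · rintro (⟨hx | ⟨p, hp, h2, rfl⟩⟩ | hP)
      · exact Or.inl hx
      · rcases (mem_enumerate _ _ _).mp hp with ⟨j, hj, rfl⟩
        refine Or.inr ⟨h, by simp, j, hj, ?_, ?_⟩
        · rw [List.getElem?_eq_getElem hj, ← getElem!_pos h.toList j hj]
          exact congrArg some h2
        · rw [show ((0 : Int) + j) = (j : Int) by ring,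
            PySem.List.slice_to _ (by positivity)]
          simp
      · rcases hP with ⟨t, ht, j, hj, hdot, rfl⟩
        exact Or.inr ⟨t, by simp [ht], j, hj, hdot, rfl⟩
    · rintro (hx | ⟨t, ht, j, hj, hdot, rfl⟩)
      · exact Or.inl (Or.inl hx)
      · rcases List.mem_cons.mp ht with rfl | ht
        · refine Or.inl (Or.inr ⟨((j : Int), t.toList[j]!), ?_, ?_, ?_⟩)
          · exact (mem_enumerate _ _ _).mpr ⟨j, hj, by simp⟩
          · rw [getElem!_pos t.toList j hj]
            rw [List.getElem?_eq_getElem hj] at hdot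
            exact Option.some.inj hdot
          · rw [PySem.List.slice_to _ (by positivity)]
            simp
        · exact Or.inr ⟨t, ht, j, hj, hdot, rfl⟩

-- A's removal condition coincides with the canonical parent condition
theorem condA_iff (l : List String) (s : String) :
    (∃ s2 ∈ l, s ≠ s2 ∧ PySem.Chars.startswith s2.toList (s.toList ++ ['.']) = true)
    ↔ IsParent l s.toList := by
  constructor
  · rintro ⟨t, ht, _, hsw⟩
    rcases (PySem.Chars.startswith_iff _ _).mp hsw with ⟨u, hu⟩
    have hu' : s.toList ++ '.' :: u = t.toList := by rw [← hu]; simp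
    refine ⟨t, ht, s.toList.length, ?_, ?_, ?_⟩
    · rw [← hu']
      simp only [List.length_append, List.length_cons]
      omega
    · rw [← hu', List.getElem?_append_right (le_refl _)]
      simp
    · rw [← hu']
      exact (List.take_left).symm
  · rintro ⟨t, ht, j, hj, hdot, hpre⟩
    have hlen : s.toList.length = j := by
      rw [hpre]
      simp only [List.length_take]
      omega
    have hdj : t.toList[j]'hj = '.' := by
      rw [List.getElem?_eq_getElem hj] at hdot
      exact Option.some.inj hdot
    refine ⟨t, ht, ?_, ?_⟩
    · intro hst
      rw [hst] at hlen
      omega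
    · rw [PySem.Chars.startswith_iff]
      refine ⟨t.toList.drop (j + 1), ?_⟩
      have hcd : t.toList[j]'hj :: t.toList.drop (j + 1) = t.toList.drop j :=
        List.getElem_cons_drop hj
      calc (s.toList ++ ['.']) ++ t.toList.drop (j + 1)
          = s.toList ++ '.' :: t.toList.drop (j + 1) := by simp
        _ = t.toList.take j ++ t.toList.drop j := by rw [hpre, ← hcd, hdj]
        _ = t.toList := List.take_append_drop j t.toList

-- the two filter predicates agree
theorem pred_eq (sections : List String) (s : String) (hs : s ∈ sections) :
    (!(PySem.Set.contains
        (sections.foldl (fun acc s1 =>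
          sections.foldl (fun acc2 s2 =>
            if s1 ≠ s2 ∧ PySem.Chars.startswith s2.toList (s1.toList ++ ['.']) = true then
              PySem.Set.add acc2 s1 else acc2) acc) PySem.Set.empty) s))
    = (!(PySem.Set.contains
        (sections.foldl (fun acc t =>
          (PySem.List.enumerate t.toList).foldl (fun acc2 p =>
            if p.2 = '.' then PySem.Set.add acc2 (PySem.List.slice t.toList none (some p.1))
            else acc2) acc) PySem.Set.empty) s.toList)) := by
  congr 1
  rw [Bool.eq_iff_iff, PySem.Set.contains_iff, PySem.Set.contains_iff, memA, memB]
  constructor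
  · rintro (h | ⟨_, hex⟩)
    · simp [PySem.Set.empty] at h
    · exact Or.inr ((condA_iff sections s).mp hex)
  · rintro (h | hP)
    · simp [PySem.Set.empty] at h
    · exact Or.inr ⟨hs, (condA_iff sections s).mpr hP⟩

-- no string is its own parent: a singleton survives B's filter
theorem not_parent_self (s : String) : ¬ IsParent [s] s.toList := by
  rintro ⟨t, ht, j, hj, _, hpre⟩
  simp only [List.mem_singleton] at ht
  rw [ht] at hpre hj
  have hlen := congrArg List.length hpre
  simp only [List.length_take] at hlen
  omega

-- an element of maximal length exists
theorem exists_max (l : List String) (h : l ≠ []) :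
    ∃ m ∈ l, ∀ t ∈ l, t.toList.length ≤ m.toList.length := by
  induction l with
  | nil => exact absurd rfl h
  | cons a tl ih =>
    rcases eq_or_ne tl [] with rfl | htl
    · exact ⟨a, by simp, by simp⟩
    · rcases ih htl with ⟨m, hm, hmax⟩
      rcases le_or_gt a.toList.length m.toList.length with hle | hlt
      · refine ⟨m, by simp [hm], ?_⟩
        intro t ht
        rcases List.mem_cons.mp ht with rfl | ht
        · exact hle
        · exact hmax t ht
      · refine ⟨a, by simp, ?_⟩
        intro t ht
        rcases List.mem_cons.mp ht with rfl | ht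
        · exact le_refl _
        · exact le_trans (hmax t ht) (le_of_lt hlt)

-- B keeps an element of maximal length, so its result is nonempty
theorem filterB_ne_nil (sections : List String) (h : sections ≠ []) :
    prefer_specific_py_alt sections ≠ [] := by
  rcases exists_max sections h with ⟨m, hm, hmax⟩
  have hmem : m ∈ prefer_specific_py_alt sections := by
    show m ∈ sections.filter (fun s => !(PySem.Set.contains
      (sections.foldl (fun acc t =>
        (PySem.List.enumerate t.toList).foldl (fun acc2 p =>
          if p.2 = '.' then PySem.Set.add acc2 (PySem.List.slice t.toList none (some p.1))
          else acc2) acc) PySem.Set.empty) s.toList))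
    rw [List.mem_filter]
    refine ⟨hm, ?_⟩
    rw [Bool.not_eq_true', Bool.eq_false_iff]
    intro hc
    rw [PySem.Set.contains_iff, memB] at hc
    rcases hc with h0 | ⟨t, ht, j, hj, _, hpre⟩
    · simp [PySem.Set.empty] at h0
    · have h1 := congrArg List.length hpre
      simp only [List.length_take] at h1
      have h2 := hmax t ht
      omega
  exact List.ne_nil_of_mem hmem

-- ===== VERDICT (by name: the statement is the Claim_ definition above) =====
theorem prefer_specific_py_spec : Claim_equal_prefer_specific_py := by
  intro sections _
  unfold Spec_prefer_specific_py prefer_specific_py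
  split_ifs with hlen
  · -- length ≤ 1: A returns sections; B's filter removes nothing
    rcases sections with _ | ⟨t, _ | ⟨u, rest⟩⟩
    · rfl
    · have hrw : prefer_specific_py_alt [t] = List.filter (fun s => !(PySem.Set.contains
          ([t].foldl (fun acc t =>
            (PySem.List.enumerate t.toList).foldl (fun acc2 p =>
              if p.2 = '.' then PySem.Set.add acc2 (PySem.List.slice t.toList none (some p.1))
              else acc2) acc) PySem.Set.empty) s.toList)) [t] := rfl
      have hk : (!(PySem.Set.contains
          ([t].foldl (fun acc t =>
            (PySem.List.enumerate t.toList).foldl (fun acc2 p =>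
              if p.2 = '.' then PySem.Set.add acc2 (PySem.List.slice t.toList none (some p.1))
              else acc2) acc) PySem.Set.empty) t.toList)) = true := by
        rw [Bool.not_eq_true', Bool.eq_false_iff]
        intro hc
        rw [PySem.Set.contains_iff, memB] at hc
        rcases hc with h0 | hP
        · simp [PySem.Set.empty] at h0
        · exact not_parent_self t hP
      rw [hrw, List.filter_cons, if_pos hk, List.filter_nil]
    · exact absurd hlen (by simp)
  · -- length ≥ 2: A's filter equals B's, and it is nonempty
    have hne : sections ≠ [] := by
      intro h
      rw [h] at hlen
      simp at hlen
    have hfe : sections.filter (fun s => !(PySem.Set.contains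
        (sections.foldl (fun acc s1 =>
          sections.foldl (fun acc2 s2 =>
            if s1 ≠ s2 ∧ PySem.Chars.startswith s2.toList (s1.toList ++ ['.']) = true then
              PySem.Set.add acc2 s1 else acc2) acc) PySem.Set.empty) s))
        = prefer_specific_py_alt sections := by
      show _ = sections.filter (fun s => !(PySem.Set.contains
        (sections.foldl (fun acc t =>
          (PySem.List.enumerate t.toList).foldl (fun acc2 p =>
            if p.2 = '.' then PySem.Set.add acc2 (PySem.List.slice t.toList none (some p.1))
            else acc2) acc) PySem.Set.empty) s.toList))
      exact List.filter_congr (fun s hs => pred_eq sections s hs)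
    show (if (sections.filter (fun s => !(PySem.Set.contains
        (sections.foldl (fun acc s1 =>
          sections.foldl (fun acc2 s2 =>
            if s1 ≠ s2 ∧ PySem.Chars.startswith s2.toList (s1.toList ++ ['.']) = true then
              PySem.Set.add acc2 s1 else acc2) acc) PySem.Set.empty) s))) ≠ [] then
        (sections.filter (fun s => !(PySem.Set.contains
        (sections.foldl (fun acc s1 =>
          sections.foldl (fun acc2 s2 =>
            if s1 ≠ s2 ∧ PySem.Chars.startswith s2.toList (s1.toList ++ ['.']) = true then
              PySem.Set.add acc2 s1 else acc2) acc) PySem.Set.empty) s)))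
      else sections) = prefer_specific_py_alt sections
    rw [hfe]
    rw [if_pos (filterB_ne_nil sections hne)]
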